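-- pv_equiv track=rewrite | github.com/Abhikaravate/python-Assi-1 | Algzantho/QF.py | journey
-- ===== SOURCE A (Python) =====
-- from collections import deque
--
-- def journey(t, cases):
--     results = []
--     for _ in range(t):
--         n, k = cases[_][:2]
--         arr = cases[_][2]
--
--         dp = [0] * n
--         dp[0] = arr[0]
--
--         dq = deque()
--         dq.append(0)
--
--         for i in range(1, n):
--             while dq and dq[0] < i - k:
--                 dq.popleft()
--
--             dp[i] = dp[dq[0]] + arr[i]
--
--             while dq and dp[dq[-1]] <= dp[i]:
--                 dq.pop()
--
--             dq.append(i)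
--
--         results.append(dp[-1])
--
--     return results
-- ===== SOURCE B (Python) =====
-- def journey(t, cases):
--     out = []
--     for n, k, arr in cases[:max(t, 0)]:
--         dp = [arr[0]]
--         for i in range(1, n):
--             dp.append(max(dp[max(0, i - k):i]) + arr[i])
--         out.append(dp[-1])
--     return out
-- ===== Notes on version B (the rewrite author's own statement) =====
-- stated objective: simpler
-- what changed: Replaces the monotonic-deque sliding-window maximum with a direct max() over the dp slice dp[max(0,i-k):i], and iterates over cases[:max(t,0)] instead of indexing cases by range(t); no deque, no in-place dp array.
import Mathlib
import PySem

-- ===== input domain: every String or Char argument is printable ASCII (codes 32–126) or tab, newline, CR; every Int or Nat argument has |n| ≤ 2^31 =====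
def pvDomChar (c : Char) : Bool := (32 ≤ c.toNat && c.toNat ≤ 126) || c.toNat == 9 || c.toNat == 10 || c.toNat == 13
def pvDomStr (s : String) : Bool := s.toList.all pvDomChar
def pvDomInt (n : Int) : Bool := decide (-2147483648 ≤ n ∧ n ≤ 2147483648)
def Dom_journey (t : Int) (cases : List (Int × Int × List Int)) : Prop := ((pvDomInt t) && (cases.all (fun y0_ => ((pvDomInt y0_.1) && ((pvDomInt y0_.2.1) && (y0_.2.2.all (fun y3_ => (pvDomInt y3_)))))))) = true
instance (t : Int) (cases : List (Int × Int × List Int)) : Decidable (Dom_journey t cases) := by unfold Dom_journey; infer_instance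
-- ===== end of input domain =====

-- B replaces A's monotonic deque by a direct max() over the dp window slice and loops over cases[:t]:
-- simpler, same return value on Pre_ (neither version mutates its arguments).

-- ===== PORT A =====
-- 'while dq and dp[dq[-1]] <= dp[i]: dq.pop()' — pop elements from the BACK while the predicate holds
def pvPopBack {α : Type} (p : α → Bool) : List α → List α
  | [] => []
  | x :: rest =>
    match pvPopBack p rest with
    | [] => if p x then [] else [x]
    | r => x :: r

-- body of A's 'for i in range(1, n)' loop; state = (dp, dq) with dq front-first
def pvStepA (k : Int) (arr : List Int) (st : List Int × List Int) (i : Int) : List Int × List Int :=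
  let dp := st.1
  let dq := st.2
  -- while dq and dq[0] < i - k: dq.popleft()
  let dq1 := dq.dropWhile (fun j => decide (j < i - k))
  -- dp[i] = dp[dq[0]] + arr[i]  (empty dq1 would be IndexError in Python: excluded by Pre_, headD exact inside Pre_)
  let dp1 := PySem.List.pySetD dp i (PySem.List.pyGetD dp (dq1.headD 0) 0 + PySem.List.pyGetD arr i 0)
  -- while dq and dp[dq[-1]] <= dp[i]: dq.pop()
  let dq2 := pvPopBack (fun j => decide (PySem.List.pyGetD dp1 j 0 ≤ PySem.List.pyGetD dp1 i 0)) dq1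
  -- dq.append(i)
  (dp1, dq2 ++ [i])

-- one iteration of A's outer loop: computes dp[-1] for one case (n, k, arr)
def pvCaseA (c : Int × Int × List Int) : Int :=
  let n := c.1
  let k := c.2.1
  let arr := c.2.2
  -- dp = [0] * n; dp[0] = arr[0]  (IndexError when n < 1 or arr = []: excluded by Pre_)
  let dp0 := PySem.List.pySetD (List.replicate n.toNat 0) 0 (PySem.List.pyGetD arr 0 0)
  let st := (PySem.List.pyRange 1 n 1).foldl (pvStepA k arr) (dp0, ([0] : List Int))
  -- results.append(dp[-1])
  PySem.List.pyGetD st.1 (-1) 0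

def journey (t : Int) (cases : List (Int × Int × List Int)) : List Int :=
  -- for _ in range(t): … cases[_] …  (IndexError for _ ≥ len(cases): excluded by Pre_, getD exact inside Pre_)
  (PySem.List.pyRange 0 t 1).foldl (fun results u =>
    results ++ [pvCaseA (PySem.List.pyGetD cases u (0, 0, []))]) []

-- ===== PORT B =====
-- body of B's 'for i in range(1, n)' loop
def pvStepB (k : Int) (arr : List Int) (dp : List Int) (i : Int) : List Int :=
  -- dp.append(max(dp[max(0, i-k):i]) + arr[i])  (ValueError on an empty slice: excluded by Pre_, getD exact inside Pre_)
  dp ++ [(PySem.List.max? (PySem.List.slice dp (some (max 0 (i - k))) (some i)) (fun x => x)).getD 0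
         + PySem.List.pyGetD arr i 0]

-- one iteration of B's loop over cases[:t]
def pvCaseB (c : Int × Int × List Int) : Int :=
  let n := c.1
  let k := c.2.1
  let arr := c.2.2
  -- dp = [arr[0]]  (IndexError on empty arr: excluded by Pre_)
  let dp := (PySem.List.pyRange 1 n 1).foldl (pvStepB k arr) [PySem.List.pyGetD arr 0 0]
  -- out.append(dp[-1])
  PySem.List.pyGetD dp (-1) 0

def journey_alt (t : Int) (cases : List (Int × Int × List Int)) : List Int :=
  -- for n, k, arr in cases[:max(t, 0)]: …
  (PySem.List.slice cases none (some (max t 0))).foldl (fun out c => out ++ [pvCaseB c]) []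

-- ===== PRECONDITION & SPEC =====
-- Pre_ excludes exactly the inputs where A raises: t beyond len(cases), or one of the first t cases
-- with n < 1, arr shorter than n, or n > 1 with k < 1 (all IndexError).
def Pre_journey (t : Int) (cases : List (Int × Int × List Int)) : Prop :=
  t ≤ cases.length ∧
    ∀ c ∈ cases.take t.toNat, 1 ≤ c.1 ∧ c.1 ≤ c.2.2.length ∧ (c.1 = 1 ∨ 1 ≤ c.2.1)
instance (t : Int) (cases : List (Int × Int × List Int)) : Decidable (Pre_journey t cases) := by unfold Pre_journey; infer_instance
def pvWitness_journey : Int × (List (Int × Int × List Int)) := (1, [(3, 2, [1, -2, 3])])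

def Spec_journey (t : Int) (cases : List (Int × Int × List Int)) (out : List Int) : Prop := out = journey_alt t cases
instance (t : Int) (cases : List (Int × Int × List Int)) (out : List Int) : Decidable (Spec_journey t cases out) := by unfold Spec_journey; infer_instance

-- ===== CLAIM (what is proved, stated in full; the proofs are below) =====
def Claim_equal_journey : Prop := ∀ (t : Int) (cases : List (Int × Int × List Int)), Dom_journey t cases → Pre_journey t cases → Spec_journey t cases (journey t cases)
-- ===== LEMMAS AND PROOFS =====

-- dp values of one case, as B computes them: pvDpW arr kn m = [dp[0], …, dp[m]]
def pvDpW (arr : List Int) (kn : ℕ) : ℕ → List Int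
  | 0 => [arr.getD 0 0]
  | m+1 =>
    let prev := pvDpW arr kn m
    prev ++ [(match prev.drop (m + 1 - kn) with | [] => 0 | x :: xs => xs.foldl max x) + arr.getD (m+1) 0]

def pvDpS (arr : List Int) (kn : ℕ) (j : ℕ) : Int := (pvDpW arr kn j).getD j 0

-- the window maximum used to build dp entry e (meaningful for e ≥ 1)
def pvM (arr : List Int) (kn : ℕ) (e : ℕ) : Int :=
  match (pvDpW arr kn (e-1)).drop (e - kn) with | [] => 0 | x :: xs => xs.foldl max x

-- 'j survives all later entries up to e': dp[j] strictly beats dp[l] for every j < l ≤ e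
def pvGood (arr : List Int) (kn : ℕ) (e j : ℕ) : Bool :=
  (List.range' (j+1) (e - j)).all (fun l => decide (pvDpS arr kn l < pvDpS arr kn j))

-- the deque's contents after fully processing entry e
def pvCand (arr : List Int) (kn : ℕ) (e : ℕ) : List ℕ :=
  (List.range (e+1)).filter (fun j => decide (e ≤ j + kn) && pvGood arr kn e j)

-- the deque's contents after the front prune at step e
def pvPruned (arr : List Int) (kn : ℕ) (e : ℕ) : List ℕ :=
  (List.range e).filter (fun j => decide (e ≤ j + kn) && pvGood arr kn (e-1) j)

theorem pvDpW_length (arr : List Int) (kn : ℕ) (m : ℕ) : (pvDpW arr kn m).length = m + 1 := by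
  induction m with
  | zero => rfl
  | succ m ih => simp [pvDpW, ih]
theorem pvDpW_getD (arr : List Int) (kn : ℕ) {j m : ℕ} (h : j ≤ m) :
    (pvDpW arr kn m).getD j 0 = pvDpS arr kn j := by
  induction m with
  | zero => interval_cases j; rfl
  | succ m ih =>
    rcases Nat.lt_or_ge j (m+1) with hj | hj
    · rw [pvDpW]
      rw [List.getD_append _ _ _ _ (by rw [pvDpW_length]; omega)]
      exact ih (by omega)
    · have : j = m + 1 := by omega
      subst this; rfl
theorem pvDpW_eq_map (arr : List Int) (kn : ℕ) (m : ℕ) :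
    pvDpW arr kn m = (List.range (m+1)).map (pvDpS arr kn) := by
  apply List.ext_getElem
  · simp [pvDpW_length]
  · intro i h1 h2
    rw [List.getElem_map, List.getElem_range]
    have := pvDpW_getD arr kn (j := i) (m := m) (by simpa [pvDpW_length] using h1)
    rwa [List.getD_eq_getElem _ _ h1] at this
theorem pvM_bounds (arr : List Int) (kn : ℕ) (e : ℕ) (hk : 1 ≤ kn) (he : 1 ≤ e) :
    (∀ j, e - kn ≤ j → j < e → pvDpS arr kn j ≤ pvM arr kn e) ∧
    (∃ j, e - kn ≤ j ∧ j < e ∧ pvDpS arr kn j = pvM arr kn e) := by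
  have hw : (pvDpW arr kn (e-1)).drop (e - kn) =
      (List.range' (e - kn) (e - (e - kn))).map (pvDpS arr kn) := by
    rw [pvDpW_eq_map, ← List.map_drop, List.range_eq_range', List.drop_range']
    congr 2 <;> omega
  have hlen : 0 < e - (e - kn) := by omega
  constructor
  · intro j h1 h2
    have hmem : pvDpS arr kn j ∈ (pvDpW arr kn (e-1)).drop (e - kn) := by
      rw [hw]; exact List.mem_map_of_mem (by rw [List.mem_range'_1]; omega)
    rw [pvM]
    rcases hd : (pvDpW arr kn (e-1)).drop (e - kn) with _ | ⟨x, xs⟩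
    · simp [hd] at hmem
    · rw [hd] at hmem
      rcases List.mem_cons.mp hmem with h | h
      · rw [h]; exact (PySem.List.le_foldl_max xs x).1
      · exact (PySem.List.le_foldl_max xs x).2 _ h
  · rw [pvM]
    rcases hd : (pvDpW arr kn (e-1)).drop (e - kn) with _ | ⟨x, xs⟩
    · exfalso
      have := congrArg List.length hd
      simp [pvDpW_length] at this
      omega
    · have hmem : xs.foldl max x ∈ x :: xs := by
        rcases PySem.List.foldl_max_mem xs x with h | h
        · rw [h]; exact List.mem_cons_self
        · exact List.mem_cons_of_mem _ h
      rw [← hd, hw] at hmem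
      rcases List.mem_map.mp hmem with ⟨j, hj, hje⟩
      rw [List.mem_range'_1] at hj
      exact ⟨j, by omega, by omega, hje⟩
theorem pvDropWhile_sorted {α : Type} [Preorder α] (p : α → Bool)
    (hp : ∀ x y : α, x ≤ y → p y = true → p x = true) :
    ∀ l : List α, l.Pairwise (· ≤ ·) → l.dropWhile p = l.filter (fun x => !p x) := by
  intro l hl
  induction l with
  | nil => rfl
  | cons x xs ih =>
    rcases List.pairwise_cons.mp hl with ⟨hx, hxs⟩
    by_cases h : p x = true
    · rw [List.dropWhile_cons_of_pos h, List.filter_cons_of_neg (by simp [h]), ih hxs]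
    · rw [List.dropWhile_cons_of_neg h, List.filter_cons_of_pos (by simp [h])]
      have : ∀ y ∈ xs, p y = false := by
        intro y hy
        by_contra hpy
        exact h (hp x y (hx y hy) (by simpa using hpy))
      rw [List.filter_eq_self.mpr (by intro y hy; simp [this y hy])]

theorem pvPopBack_filter {α : Type} (p : α → Bool) :
    ∀ l : List α, l.Pairwise (fun a b => p a = true → p b = true) →
      pvPopBack p l = l.filter (fun x => !p x) := by
  intro l hl
  induction l with
  | nil => rfl
  | cons x xs ih =>
    rcases List.pairwise_cons.mp hl with ⟨hx, hxs⟩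
    rw [pvPopBack, ih hxs]
    rcases hr : xs.filter (fun x => !p x) with _ | ⟨y, ys⟩
    · by_cases h : p x = true <;> simp [h, hr]
    · have hy : y ∈ xs.filter (fun x => !p x) := by rw [hr]; exact List.mem_cons_self
      rcases List.mem_filter.mp hy with ⟨hymem, hyp⟩
      have hpx : ¬ p x = true := by
        intro hpx
        have := hx y hymem hpx
        simp [this] at hyp
      simp [hpx, hr]

theorem pvPopBack_map {α β : Type} (p : β → Bool) (f : α → β) :
    ∀ l : List α, pvPopBack p (l.map f) = (pvPopBack (fun x => p (f x)) l).map f := by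
  intro l
  induction l with
  | nil => rfl
  | cons x xs ih =>
    rw [List.map_cons, pvPopBack, pvPopBack, ih]
    rcases hr : pvPopBack (fun x => p (f x)) xs with _ | ⟨y, ys⟩
    · by_cases h : p (f x) = true <;> simp [h]
    · simp

theorem pvHead_min {α : Type} [Preorder α] :
    ∀ (l : List α), l.Pairwise (· < ·) → ∀ h x, x ∈ l → l.headD h ≤ x := by
  intro l hl h x hx
  rcases l with _ | ⟨a, t⟩
  · simp at hx
  · rcases List.mem_cons.mp hx with rfl | hx
    · simp
    · exact le_of_lt ((List.pairwise_cons.mp hl).1 x hx)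

theorem pvPruned_sorted (arr : List Int) (kn : ℕ) (e : ℕ) :
    (pvPruned arr kn e).Pairwise (· < ·) :=
  (List.pairwise_lt_range).filter _

theorem pvPruned_head (arr : List Int) (kn : ℕ) (e : ℕ) (hk : 1 ≤ kn) (he : 1 ≤ e) :
    pvPruned arr kn e ≠ [] ∧ pvDpS arr kn ((pvPruned arr kn e).headD 0) = pvM arr kn e := by
  obtain ⟨hub, j0, hj0a, hj0b, hj0c⟩ := pvM_bounds arr kn e hk he
  set P : ℕ → Prop := fun j => e - kn ≤ j ∧ pvDpS arr kn j = pvM arr kn e with hP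
  have : DecidablePred P := by intro j; rw [hP]; infer_instance
  set js : ℕ := Nat.findGreatest P (e-1) with hjs
  have hPj0 : P j0 := ⟨hj0a, hj0c⟩
  have hPj : P js := Nat.findGreatest_spec (m := j0) (by omega) hPj0
  have hjsle : js ≤ e - 1 := Nat.findGreatest_le _
  have hgood : pvGood arr kn (e-1) js = true := by
    rw [pvGood, List.all_eq_true]
    intro l hl
    rw [List.mem_range'_1] at hl
    have hlub : pvDpS arr kn l ≤ pvM arr kn e := hub l (by omega) (by omega)
    have hnP : ¬ P l := by
      apply Nat.findGreatest_is_greatest (n := e - 1)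
      · rw [← hjs]; omega
      · omega
    have hne : pvDpS arr kn l ≠ pvM arr kn e := by
      intro hEq
      exact hnP ⟨by omega, hEq⟩
    simp only [decide_eq_true_eq]
    rw [hPj.2]
    omega
  have hmem : js ∈ pvPruned arr kn e := by
    rw [pvPruned, List.mem_filter]
    refine ⟨List.mem_range.mpr (by omega), ?_⟩
    simp only [Bool.and_eq_true, decide_eq_true_eq]
    exact ⟨by omega, hgood⟩
  have hne : pvPruned arr kn e ≠ [] := by
    intro h; rw [h] at hmem; simp at hmem
  refine ⟨hne, ?_⟩
  set h0 : ℕ := (pvPruned arr kn e).headD 0 with hh0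
  have hh0mem : h0 ∈ pvPruned arr kn e := by
    rcases hl : pvPruned arr kn e with _ | ⟨a, t⟩
    · exact absurd hl hne
    · rw [hh0, hl]; simp
  have hhle : h0 ≤ js := pvHead_min _ (pvPruned_sorted arr kn e) 0 js hmem
  rcases List.mem_filter.mp hh0mem with ⟨hh0r, hh0p⟩
  rw [List.mem_range] at hh0r
  simp only [Bool.and_eq_true, decide_eq_true_eq] at hh0p
  rcases Nat.lt_or_ge h0 js with hlt | hge
  · exfalso
    have : pvDpS arr kn js < pvDpS arr kn h0 := by
      have := (List.all_eq_true.mp hh0p.2) js (by rw [List.mem_range'_1]; omega)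
      simpa using this
    have hub' : pvDpS arr kn h0 ≤ pvM arr kn e := hub h0 (by omega) (by omega)
    rw [hPj.2] at this
    omega
  · have : h0 = js := by omega
    rw [this, hPj.2]


theorem pvGood_split (arr : List Int) (kn : ℕ) {e j : ℕ} (h : j < e) :
    pvGood arr kn e j = (pvGood arr kn (e-1) j && decide (pvDpS arr kn e < pvDpS arr kn j)) := by
  rw [pvGood, pvGood, show e - j = (e-1-j)+1 from by omega, List.range'_concat,
      show j+1+1*(e-1-j) = e from by omega, List.all_append]
  simp

theorem pvDpW_succ_eq (arr : List Int) (kn : ℕ) (e : ℕ) (he : 1 ≤ e) :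
    pvDpW arr kn e = pvDpW arr kn (e-1) ++ [pvM arr kn e + arr.getD e 0] := by
  conv_lhs => rw [show e = (e-1)+1 from by omega, pvDpW]
  rw [pvM, show (e-1)+1-kn = e-kn from by omega, show (e-1)+1 = e from by omega]

theorem pvHeadD_map_zero (l : List ℕ) :
    (l.map (fun j : ℕ => (j : Int))).headD 0 = ((l.headD 0 : ℕ) : Int) := by
  cases l <;> simp

theorem pvDp_getD (arr : List Int) (kn : ℕ) {j m : ℕ} (hj : j ≤ m) (z : List Int) :
    (pvDpW arr kn m ++ z).getD j 0 = pvDpS arr kn j := by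
  rw [List.getD_append _ _ _ _ (by rw [pvDpW_length]; omega), pvDpW_getD arr kn hj]

theorem pvStepA_one (n : ℕ) (k : Int) (arr : List Int) (hk : 1 ≤ k) (e : ℕ) (he : 1 ≤ e)
    (hen : e + 1 ≤ n) :
    pvStepA k arr (pvDpW arr k.toNat (e-1) ++ List.replicate (n - e) 0,
                   (pvCand arr k.toNat (e-1)).map (fun j : ℕ => (j : Int))) (e : Int) =
    (pvDpW arr k.toNat e ++ List.replicate (n - (e+1)) 0,
     (pvCand arr k.toNat e).map (fun j : ℕ => (j : Int))) := by
  set kn := k.toNat with hkn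
  have hk1 : 1 ≤ kn := by omega
  have hsorted : (pvCand arr kn (e-1)).Pairwise (· ≤ ·) :=
    (List.pairwise_lt_range.filter _).imp le_of_lt
  have hcand : pvCand arr kn (e-1) =
      (List.range e).filter (fun j => decide (e-1 ≤ j + kn) && pvGood arr kn (e-1) j) := by
    rw [pvCand, show e-1+1 = e from by omega]
  -- (a) the front prune yields pvPruned e
  have ha : (((pvCand arr kn (e-1)).map (fun j : ℕ => (j:Int))).dropWhile
        (fun j => decide (j < (e:Int) - k))) = (pvPruned arr kn e).map (fun j : ℕ => (j:Int)) := by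
    rw [List.dropWhile_map]
    congr 1
    rw [pvDropWhile_sorted _ (by
        intro x y hxy hpy
        simp only [Function.comp_apply, decide_eq_true_eq] at *
        omega) _ hsorted]
    rw [hcand, List.filter_filter, pvPruned]
    apply List.filter_congr
    intro j hj
    rw [List.mem_range] at hj
    cases hg : pvGood arr kn (e-1) j
    · simp
    · simp only [Bool.and_true, Function.comp_apply, ← decide_not, ← Bool.decide_and,
        decide_eq_decide]
      omega
  obtain ⟨hpne, hphead⟩ := pvPruned_head arr kn e hk1 he
  have hheadlt : (pvPruned arr kn e).headD 0 < e := by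
    have hmem : (pvPruned arr kn e).headD 0 ∈ pvPruned arr kn e := by
      rcases hl : pvPruned arr kn e with _ | ⟨a, t⟩
      · exact absurd hl hpne
      · simp
    rcases List.mem_filter.mp hmem with ⟨hr, _⟩
    exact List.mem_range.mp hr
  -- (b) the head value is the window max
  have hb : PySem.List.pyGetD (pvDpW arr kn (e-1) ++ List.replicate (n - e) 0)
      (((pvPruned arr kn e).map (fun j : ℕ => (j:Int))).headD 0) 0 = pvM arr kn e := by
    rw [pvHeadD_map_zero, PySem.List.pyGetD_natCast, pvDp_getD arr kn (by omega) _, hphead]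
  -- (c) writing dp[e] appends dp's next entry
  have hc : PySem.List.pySetD (pvDpW arr kn (e-1) ++ List.replicate (n - e) 0) (e : Int)
        (pvM arr kn e + PySem.List.pyGetD arr (e : Int) 0) =
      pvDpW arr kn e ++ List.replicate (n - (e+1)) 0 := by
    rw [PySem.List.pySetD_of_nonneg _ _ (by omega), Int.toNat_natCast, List.set_append,
        if_neg (by rw [pvDpW_length]; omega), pvDpW_length,
        show e - (e-1+1) = 0 from by omega,
        show n - e = (n - (e+1)) + 1 from by omega, List.replicate_succ, List.set_cons_zero,
        pvDpW_succ_eq arr kn e he, PySem.List.pyGetD_natCast, List.append_assoc,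
        List.singleton_append]
  -- (d) the back pops turn pvPruned e into pvCand e minus its last element
  have hdpS_getD : ∀ j : ℕ, j ≤ e →
      PySem.List.pyGetD (pvDpW arr kn e ++ List.replicate (n - (e+1)) 0) ((j:ℕ):Int) 0 =
        pvDpS arr kn j := by
    intro j hj
    rw [PySem.List.pyGetD_natCast, pvDp_getD arr kn hj]
  have hd : pvPopBack
        (fun j => decide (PySem.List.pyGetD (pvDpW arr kn e ++ List.replicate (n - (e+1)) 0) j 0 ≤
          PySem.List.pyGetD (pvDpW arr kn e ++ List.replicate (n - (e+1)) 0) ((e:ℕ):Int) 0))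
        ((pvPruned arr kn e).map (fun j : ℕ => (j:Int))) ++ [((e:ℕ):Int)] =
      (pvCand arr kn e).map (fun j : ℕ => (j : Int)) := by
    have hpw : (pvPruned arr kn e).Pairwise (· < ·) := pvPruned_sorted arr kn e
    have hpair : (pvPruned arr kn e).Pairwise (fun a b =>
        decide (PySem.List.pyGetD (pvDpW arr kn e ++ List.replicate (n - (e+1)) 0) ((a:ℕ):Int) 0 ≤
          PySem.List.pyGetD (pvDpW arr kn e ++ List.replicate (n - (e+1)) 0) ((e:ℕ):Int) 0) = true →
        decide (PySem.List.pyGetD (pvDpW arr kn e ++ List.replicate (n - (e+1)) 0) ((b:ℕ):Int) 0 ≤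
          PySem.List.pyGetD (pvDpW arr kn e ++ List.replicate (n - (e+1)) 0) ((e:ℕ):Int) 0) = true) := by
      refine (List.pairwise_iff_forall_sublist.mpr ?_)
      intro a b hs
      have hmem := List.Sublist.subset hs
      have hamem : a ∈ pvPruned arr kn e := hmem (by simp)
      have hbmem : b ∈ pvPruned arr kn e := hmem (by simp)
      have hab : a < b := List.pairwise_iff_forall_sublist.mp hpw hs
      rcases List.mem_filter.mp hamem with ⟨har, hap⟩
      rcases List.mem_filter.mp hbmem with ⟨hbr, _⟩
      rw [List.mem_range] at har hbr
      simp only [Bool.and_eq_true, decide_eq_true_eq] at hap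
      have hlt : pvDpS arr kn b < pvDpS arr kn a := by
        have := (List.all_eq_true.mp hap.2) b (by rw [List.mem_range'_1]; omega)
        simpa using this
      intro hpa
      rw [hdpS_getD a (by omega), hdpS_getD e (by omega), decide_eq_true_eq] at hpa
      rw [hdpS_getD b (by omega), hdpS_getD e (by omega), decide_eq_true_eq]
      omega
    rw [pvPopBack_map, pvPopBack_filter _ _ hpair,
        show ([((e:ℕ):Int)] : List Int) = List.map (fun j : ℕ => (j:Int)) [e] from rfl,
        ← List.map_append]
    congr 1
    rw [pvPruned, List.filter_filter]
    rw [pvCand, List.range_succ, List.filter_append, List.filter_cons, List.filter_nil]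
    rw [if_pos (by
      simp only [Bool.and_eq_true, decide_eq_true_eq]
      refine ⟨by omega, ?_⟩
      rw [pvGood, show e - e = 0 from by omega]
      simp)]
    congr 1
    apply List.filter_congr
    intro j hj
    rw [List.mem_range] at hj
    rw [hdpS_getD j (by omega), hdpS_getD e (by omega), pvGood_split arr kn hj]
    cases hg : pvGood arr kn (e-1) j
    · simp
    · simp only [Bool.true_and, Bool.and_true, ← decide_not]
      rw [decide_eq_decide.mpr Int.not_le, Bool.and_comm]
  -- assemble
  simp only [pvStepA]
  rw [ha, hb, hc, hd]

-- invariant of A's inner loop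
theorem pvStepA_inv (n : ℕ) (k : Int) (arr : List Int) (hk : 1 ≤ k) :
    ∀ m : ℕ, 1 ≤ m → m ≤ n →
      (PySem.List.pyRange 1 (m : Int) 1).foldl (pvStepA k arr)
        (PySem.List.pySetD (List.replicate n 0) 0 (PySem.List.pyGetD arr 0 0), ([0] : List Int)) =
      (pvDpW arr k.toNat (m-1) ++ List.replicate (n - m) 0,
       (pvCand arr k.toNat (m-1)).map (fun j : ℕ => (j : Int))) := by
  intro m hm
  induction m, hm using Nat.le_induction with
  | base =>
    intro hn
    rw [Nat.cast_one, PySem.List.pyRange_one_eq_nil le_rfl]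
    simp only [List.foldl_nil]
    rw [Prod.mk.injEq]
    refine ⟨?_, ?_⟩
    · rw [PySem.List.pySetD_of_nonneg _ _ (by omega), show ((0:Int).toNat = 0) from rfl,
          show n = (n-1)+1 from by omega, List.replicate_succ, List.set_cons_zero,
          PySem.List.pyGetD_ofNat']
      show _ = pvDpW arr k.toNat 0 ++ _
      rw [pvDpW]
      rfl
    · rw [show (1:ℕ)-1 = 0 from rfl]
      simp [pvCand, pvGood]
  | succ m hm ih =>
    intro hn
    rw [show ((m+1 : ℕ) : Int) = (m : Int) + 1 from by push_cast; ring,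
        PySem.List.pyRange_one_succ_right (by exact_mod_cast hm), List.foldl_append,
        ih (by omega)]
    simp only [List.foldl_cons, List.foldl_nil]
    rw [pvStepA_one n k arr hk m hm hn]
    congr 2

-- invariant of B's inner loop
theorem pvStepB_one (k : Int) (arr : List Int) (hk : 1 ≤ k) (m : ℕ) (hm : 1 ≤ m) :
    pvStepB k arr (pvDpW arr k.toNat (m-1)) (m : Int) = pvDpW arr k.toNat m := by
  have hlen : (pvDpW arr k.toNat (m-1)).length = m := by rw [pvDpW_length]; omega
  have hmax : max 0 ((m : Int) - k) = ((m - k.toNat : ℕ) : Int) := by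
    rw [max_def]; split <;> omega
  rw [pvStepB, hmax, PySem.List.slice_natCast,
      List.take_of_length_le (by rw [List.length_drop, hlen])]
  have hdlen : 0 < ((pvDpW arr k.toNat (m-1)).drop (m - k.toNat)).length := by
    rw [List.length_drop, hlen]; omega
  rcases hd : (pvDpW arr k.toNat (m-1)).drop (m - k.toNat) with _ | ⟨x, xs⟩
  · rw [hd] at hdlen; simp at hdlen
  · rw [PySem.List.max?_id_cons, Option.getD_some, PySem.List.pyGetD_natCast]
    conv_rhs => rw [show m = (m-1)+1 from by omega, pvDpW]
    rw [show (m-1)+1 - k.toNat = m - k.toNat from by omega, hd,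
        show (m-1)+1 = m from by omega]

theorem pvStepB_inv (k : Int) (arr : List Int) (hk : 1 ≤ k) :
    ∀ m : ℕ, 1 ≤ m →
      (PySem.List.pyRange 1 (m : Int) 1).foldl (pvStepB k arr) [PySem.List.pyGetD arr 0 0] =
      pvDpW arr k.toNat (m-1) := by
  intro m hm
  induction m, hm using Nat.le_induction with
  | base =>
    rw [Nat.cast_one, PySem.List.pyRange_one_eq_nil le_rfl]
    simp [pvDpW, PySem.List.pyGetD_ofNat']
  | succ m hm ih =>
    rw [show ((m+1 : ℕ) : Int) = (m : Int) + 1 from by push_cast; ring,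
        PySem.List.pyRange_one_succ_right (by exact_mod_cast hm), List.foldl_append, ih]
    simp only [List.foldl_cons, List.foldl_nil]
    rw [pvStepB_one k arr hk m hm]
    congr 1

theorem pvCase_eq (c : Int × Int × List Int) (h1 : 1 ≤ c.1) (h2 : c.1 ≤ c.2.2.length)
    (h3 : c.1 = 1 ∨ 1 ≤ c.2.1) : pvCaseA c = pvCaseB c := by
  obtain ⟨n, k, arr⟩ := c
  simp only at h1 h2 h3
  rcases eq_or_lt_of_le h1 with h1' | h1'
  · -- a single-entry case: both loops are empty
    rw [pvCaseA, pvCaseB, ← h1']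
    simp [PySem.List.pyRange_one_eq_nil, PySem.List.pySetD_of_nonneg,
          PySem.List.pyGetD, PySem.List.pyGet?_neg_one]
  · -- n ≥ 2, hence k ≥ 1
    have hk : 1 ≤ k := by
      rcases h3 with h | h
      · omega
      · exact h
    set nn := n.toNat with hnn
    have hn : n = (nn : Int) := by omega
    have hnn1 : 1 ≤ nn := by omega
    rw [pvCaseA, pvCaseB]
    simp only [hn, Int.toNat_natCast]
    rw [pvStepA_inv nn k arr hk nn hnn1 le_rfl, pvStepB_inv k arr hk nn hnn1]
    simp

theorem pvFoldAppend {α β : Type} (g : α → β) :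
    ∀ (l : List α) (a : List β), l.foldl (fun r x => r ++ [g x]) a = a ++ l.map g := by
  intro l
  induction l with
  | nil => simp
  | cons x xs ih => intro a; simp [List.foldl_cons, ih]

-- ===== VERDICT (by name: the statement is the Claim_ definition above) =====
theorem journey_spec : Claim_equal_journey := by
  intro t cases hdom hpre
  rcases hpre with ⟨htlen, hcases⟩
  unfold Spec_journey
  by_cases ht0 : 0 ≤ t
  · rw [journey, journey_alt, show max t 0 = t from by omega, pvFoldAppend, pvFoldAppend,
        List.nil_append, List.nil_append, PySem.List.slice_to _ ht0]
    rw [show t = (t.toNat : Int) from by omega, PySem.List.pyRange_zero_natCast, List.map_map]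
    simp only [Int.toNat_natCast]
    apply List.ext_getElem
    · simp
      omega
    · intro i hi1 hi2
      simp only [List.getElem_map, List.getElem_range, Function.comp_apply]
      have hilen : i < cases.length := by
        simp at hi2
        omega
      rw [PySem.List.pyGetD_natCast, List.getD_eq_getElem?_getD, List.getElem?_eq_getElem hilen,
          Option.getD_some, List.getElem_take]
      have hi3 : i < (cases.take t.toNat).length := by simpa using hi2
      have hmem : cases[i] ∈ cases.take t.toNat := by
        rw [← List.getElem_take (j := t.toNat) (h := hi3)]
        exact List.getElem_mem _
      exact pvCase_eq _ (hcases _ hmem).1 (hcases _ hmem).2.1 (hcases _ hmem).2.2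
  · -- t < 0: A's loop is empty and B's slice is empty
    have ht0' : t < 0 := by omega
    rw [journey, journey_alt, show max t 0 = 0 from by omega,
        PySem.List.pyRange_one_eq_nil (by omega), PySem.List.slice_to _ le_rfl]
    simp
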